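-- pv_equiv track=rewrite | github.com/SJTU-YONGFU-RESEARCH-GRP/spi-customizer | scripts/simulator_runner.py | _create_realistic_vcd_content
-- ===== SOURCE A (Python) =====
-- def _create_realistic_vcd_content(total_time: int, num_points: int) -> str:
--     """Create realistic VCD content based on expected SPI behavior"""
--     lines = []
--
--     # VCD header
--     lines.append("$date")
--     lines.append("    Today")
--     lines.append("$end")
--     lines.append("$version")
--     lines.append("    Icarus Verilog")
--     lines.append("$end")
--     lines.append("$timescale 1ns $end")
--     lines.append("")
--     lines.append("$scope module spi_master_tb $end")
--
--     # Signal definitions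
--     lines.append("$var wire 1 ! sclk $end")      # SCLK
--     lines.append("$var wire 1 \" mosi $end")     # MOSI
--     lines.append("$var wire 1 # miso $end")      # MISO
--     lines.append("$var wire 1 $ ss_n $end")      # Slave Select
--     lines.append("$var wire 1 % busy $end")      # Busy
--     lines.append("$var wire 1 & irq $end")       # Interrupt
--     lines.append("$var wire 8 ' data $end")      # Data bus
--
--     lines.append("$upscope $end")
--     lines.append("$enddefinitions $end")
--     lines.append("")
--
--     # Initial dump
--     lines.append("$dumpvars")
--     lines.append("x!")
--     lines.append("x\"")
--     lines.append("x#")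
--     lines.append("1$")
--     lines.append("x%")
--     lines.append("x&")
--     lines.append("x'")
--     lines.append("$end")
--     lines.append("")
--
--     # Generate realistic timing data
--     time_step = total_time // num_points
--
--     for i in range(num_points):
--         current_time = i * time_step
--
--         # Realistic SPI signal patterns
--         sclk = '1' if (i // 10) % 2 == 1 else '0'  # 10ns clock
--         mosi = '1' if i % 20 < 10 else '0'          # Data pattern
--         miso = '0' if i % 25 < 15 else '1'          # Response pattern
--         ss_n = '0' if 50 < i < 150 else '1'         # Active during transaction
--         busy = '1' if 50 < i < 175 else '0'         # Busy during transaction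
--         irq = '1' if i == 175 else '0'               # IRQ at end
--         data = f"b{i % 256:08b}"                    # Data pattern
--
--         # Only write changes (not every time point)
--         if i == 0 or sclk != ('1' if ((i-1) // 10) % 2 == 1 else '0'):
--             lines.append(f"#{current_time}")
--             lines.append(f"{sclk}!")
--
--         if i == 0 or mosi != ('1' if (i-1) % 20 < 10 else '0'):
--             if i > 0:
--                 lines.append(f"#{current_time}")
--             lines.append(f"{mosi}\"")
--
--         if i == 0 or miso != ('0' if (i-1) % 25 < 15 else '1'):
--             if i > 0:
--                 lines.append(f"#{current_time}")
--             lines.append(f"{miso}#")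
--
--         if i == 0 or ss_n != ('0' if 50 < (i-1) < 150 else '1'):
--             if i > 0:
--                 lines.append(f"#{current_time}")
--             lines.append(f"{ss_n}$")
--
--         if i == 0 or busy != ('1' if 50 < (i-1) < 175 else '0'):
--             if i > 0:
--                 lines.append(f"#{current_time}")
--             lines.append(f"{busy}%")
--
--         if i == 0 or irq != ('1' if (i-1) == 175 else '0'):
--             if i > 0:
--                 lines.append(f"#{current_time}")
--             lines.append(f"{irq}&")
--
--         if i == 0 or data != f"b{(i-1) % 256:08b}":
--             if i > 0:
--                 lines.append(f"#{current_time}")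
--             lines.append(f"{data}'")
--
--     return '\n'.join(lines)
-- ===== SOURCE B (Python) =====
-- def _create_realistic_vcd_content(total_time: int, num_points: int) -> str:
--     """Create realistic VCD content based on expected SPI behavior."""
--     lines = [
--         "$date", "    Today", "$end",
--         "$version", "    Icarus Verilog", "$end",
--         "$timescale 1ns $end", "",
--         "$scope module spi_master_tb $end",
--         "$var wire 1 ! sclk $end",
--         "$var wire 1 \" mosi $end",
--         "$var wire 1 # miso $end",
--         "$var wire 1 $ ss_n $end",
--         "$var wire 1 % busy $end",
--         "$var wire 1 & irq $end",
--         "$var wire 8 ' data $end",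
--         "$upscope $end", "$enddefinitions $end", "",
--         "$dumpvars", "x!", "x\"", "x#", "1$", "x%", "x&", "x'", "$end", "",
--     ]
--
--     signals = [
--         ('!', lambda i: '1' if (i // 10) % 2 == 1 else '0'),
--         ('"', lambda i: '1' if i % 20 < 10 else '0'),
--         ('#', lambda i: '0' if i % 25 < 15 else '1'),
--         ('$', lambda i: '0' if 50 < i < 150 else '1'),
--         ('%', lambda i: '1' if 50 < i < 175 else '0'),
--         ('&', lambda i: '1' if i == 175 else '0'),
--         ("'", lambda i: f"b{i % 256:08b}"),
--     ]
--
--     time_step = total_time // num_points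
--     prev = [None] * len(signals)
--
--     for i in range(num_points):
--         t = i * time_step
--         if i == 0:
--             lines.append(f"#{t}")
--         new_prev = []
--         for (ident, fn), pv in zip(signals, prev):
--             v = fn(i)
--             if v != pv:
--                 if i > 0:
--                     lines.append(f"#{t}")
--                 lines.append(v + ident)
--             new_prev.append(v)
--         prev = new_prev
--
--     return '\n'.join(lines)
-- ===== Notes on version B (the rewrite author's own statement) =====
-- stated objective: simpler
-- what changed: Replaces A's seven copy-pasted per-signal change-detection blocks (each recomputing the previous value from i-1) by a single loop over a (identifier, value-function) table with a carried previous-value list.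
import Mathlib
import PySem

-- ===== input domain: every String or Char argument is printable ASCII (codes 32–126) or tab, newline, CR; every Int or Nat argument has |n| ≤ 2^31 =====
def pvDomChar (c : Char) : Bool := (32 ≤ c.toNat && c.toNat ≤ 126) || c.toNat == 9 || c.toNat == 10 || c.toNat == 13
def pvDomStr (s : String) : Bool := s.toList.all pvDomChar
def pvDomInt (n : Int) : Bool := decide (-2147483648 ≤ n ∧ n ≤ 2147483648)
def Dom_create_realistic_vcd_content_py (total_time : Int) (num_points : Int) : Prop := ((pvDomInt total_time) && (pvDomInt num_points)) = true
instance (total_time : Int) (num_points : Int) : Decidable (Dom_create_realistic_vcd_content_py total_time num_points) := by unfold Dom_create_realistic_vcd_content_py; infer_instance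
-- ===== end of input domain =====

-- B replaces A's seven copy-pasted change-detection blocks by one loop over a signal table with a
-- carried previous-value list (objective: simpler decomposition; same cost).

-- shared helper: f"b{n:08b}" for 0 ≤ n < 256 (exact there; both Pythons only format i % 256)
def pvBin8 (n : Int) : String :=
  "b" ++ String.ofList ((List.range 8).map (fun k => if n / 2 ^ (7 - k) % 2 == 1 then '1' else '0'))

-- fixed VCD header lines (identical literal list in both Pythons)
def pvVcdHeader : List String :=
  ["$date", "    Today", "$end",
   "$version", "    Icarus Verilog", "$end",
   "$timescale 1ns $end", "",
   "$scope module spi_master_tb $end",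
   "$var wire 1 ! sclk $end",
   "$var wire 1 \" mosi $end",
   "$var wire 1 # miso $end",
   "$var wire 1 $ ss_n $end",
   "$var wire 1 % busy $end",
   "$var wire 1 & irq $end",
   "$var wire 8 ' data $end",
   "$upscope $end", "$enddefinitions $end", "",
   "$dumpvars", "x!", "x\"", "x#", "1$", "x%", "x&", "x'", "$end", ""]

-- ===== PORT A =====
-- A's loop body, one local let per Python line, the seven if-blocks in source order
def pvStepA (time_step : Int) (lines : List String) (i : Int) : List String :=
  let current_time := i * time_step
  let sclk := if PySem.Int.mod (PySem.Int.floordiv i 10) 2 == 1 then "1" else "0"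
  let mosi := if decide (PySem.Int.mod i 20 < 10) then "1" else "0"
  let miso := if decide (PySem.Int.mod i 25 < 15) then "0" else "1"
  let ss_n := if decide (50 < i ∧ i < 150) then "0" else "1"
  let busy := if decide (50 < i ∧ i < 175) then "1" else "0"
  let irq  := if i == 175 then "1" else "0"
  let data := pvBin8 (PySem.Int.mod i 256)
  let lines := if i == 0 || sclk != (if PySem.Int.mod (PySem.Int.floordiv (i-1) 10) 2 == 1 then "1" else "0") then
      lines ++ ["#" ++ PySem.Int.toStr current_time, sclk ++ "!"] else lines
  let lines := if i == 0 || mosi != (if decide (PySem.Int.mod (i-1) 20 < 10) then "1" else "0") then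
      (if decide (0 < i) then lines ++ ["#" ++ PySem.Int.toStr current_time] else lines) ++ [mosi ++ "\""] else lines
  let lines := if i == 0 || miso != (if decide (PySem.Int.mod (i-1) 25 < 15) then "0" else "1") then
      (if decide (0 < i) then lines ++ ["#" ++ PySem.Int.toStr current_time] else lines) ++ [miso ++ "#"] else lines
  let lines := if i == 0 || ss_n != (if decide (50 < i-1 ∧ i-1 < 150) then "0" else "1") then
      (if decide (0 < i) then lines ++ ["#" ++ PySem.Int.toStr current_time] else lines) ++ [ss_n ++ "$"] else lines
  let lines := if i == 0 || busy != (if decide (50 < i-1 ∧ i-1 < 175) then "1" else "0") then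
      (if decide (0 < i) then lines ++ ["#" ++ PySem.Int.toStr current_time] else lines) ++ [busy ++ "%"] else lines
  let lines := if i == 0 || irq != (if (i-1) == 175 then "1" else "0") then
      (if decide (0 < i) then lines ++ ["#" ++ PySem.Int.toStr current_time] else lines) ++ [irq ++ "&"] else lines
  let lines := if i == 0 || data != pvBin8 (PySem.Int.mod (i-1) 256) then
      (if decide (0 < i) then lines ++ ["#" ++ PySem.Int.toStr current_time] else lines) ++ [data ++ "'"] else lines
  lines

def create_realistic_vcd_content_py (total_time : Int) (num_points : Int) : String :=
  let time_step := PySem.Int.floordiv total_time num_points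
  let lines := (PySem.List.pyRange 0 num_points 1).foldl (pvStepA time_step) pvVcdHeader
  PySem.Str.join "\n" lines

-- ===== PORT B =====
-- B's signal table: (identifier, value as a function of the loop index)
def pvSigTable : List (String × (Int → String)) :=
  [("!", fun i => if PySem.Int.mod (PySem.Int.floordiv i 10) 2 == 1 then "1" else "0"),
   ("\"", fun i => if decide (PySem.Int.mod i 20 < 10) then "1" else "0"),
   ("#", fun i => if decide (PySem.Int.mod i 25 < 15) then "0" else "1"),
   ("$", fun i => if decide (50 < i ∧ i < 150) then "0" else "1"),
   ("%", fun i => if decide (50 < i ∧ i < 175) then "1" else "0"),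
   ("&", fun i => if i == 175 then "1" else "0"),
   ("'", fun i => pvBin8 (PySem.Int.mod i 256))]

-- B's outer loop body: state = (lines, previous values); inner fold over the table zipped with prev
def pvStepB (time_step : Int) (st : List String × List (Option String)) (i : Int) :
    List String × List (Option String) :=
  let t := i * time_step
  let lines := if i == 0 then st.1 ++ ["#" ++ PySem.Int.toStr t] else st.1
  (pvSigTable.zip st.2).foldl
    (fun st2 p =>
      let v := p.1.2 i
      let lines := if some v != p.2 then
          (if decide (0 < i) then st2.1 ++ ["#" ++ PySem.Int.toStr t] else st2.1) ++ [v ++ p.1.1]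
        else st2.1
      (lines, st2.2 ++ [some v]))
    (lines, [])

def create_realistic_vcd_content_py_alt (total_time : Int) (num_points : Int) : String :=
  let time_step := PySem.Int.floordiv total_time num_points
  let st := (PySem.List.pyRange 0 num_points 1).foldl (pvStepB time_step)
      (pvVcdHeader, List.replicate 7 none)
  PySem.Str.join "\n" st.1

-- ===== PRECONDITION & SPEC =====
-- Pre_ excludes num_points = 0, where A raises ZeroDivisionError at 'total_time // num_points'.
def Pre_create_realistic_vcd_content_py (total_time : Int) (num_points : Int) : Prop := num_points ≠ 0
instance (total_time : Int) (num_points : Int) : Decidable (Pre_create_realistic_vcd_content_py total_time num_points) := by unfold Pre_create_realistic_vcd_content_py; infer_instance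
def pvWitness_create_realistic_vcd_content_py : Int × Int := (100, 4)

def Spec_create_realistic_vcd_content_py (total_time : Int) (num_points : Int) (out : String) : Prop := out = create_realistic_vcd_content_py_alt total_time num_points
instance (total_time : Int) (num_points : Int) (out : String) : Decidable (Spec_create_realistic_vcd_content_py total_time num_points out) := by unfold Spec_create_realistic_vcd_content_py; infer_instance

-- ===== CLAIM (what is proved, stated in full; the proofs are below) =====
def Claim_equal_create_realistic_vcd_content_py : Prop := ∀ (total_time : Int) (num_points : Int), Dom_create_realistic_vcd_content_py total_time num_points → Pre_create_realistic_vcd_content_py total_time num_points → Spec_create_realistic_vcd_content_py total_time num_points (create_realistic_vcd_content_py total_time num_points)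

-- ===== LEMMAS AND PROOFS =====

-- previous-value list carried by B after processing indices 0 .. i
def pvValsOpt (i : Int) : List (Option String) := pvSigTable.map (fun p => some (p.2 i))

theorem pvStepB_zero (ts : Int) (L : List String) :
    pvStepB ts (L, List.replicate 7 none) 0 = (pvStepA ts L 0, pvValsOpt 0) := by
  simp [pvStepB, pvStepA, pvSigTable, pvValsOpt, List.zip, PySem.Int.toStr]

theorem pvStepB_pos (ts : Int) (L : List String) (i : Int) (hi : 0 < i) :
    pvStepB ts (L, pvValsOpt (i - 1)) i = (pvStepA ts L i, pvValsOpt i) := by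
  have h0 : (i == 0) = false := by simp; omega
  have h1 : decide (0 < i) = true := by simp [hi]
  simp [pvStepB, pvStepA, pvSigTable, pvValsOpt, List.zip, h0, h1]

-- invariant of the two folds over range(0, m)
theorem pvFold_inv (ts : Int) (m : Nat) :
    (PySem.List.pyRange 0 (m : Int) 1).foldl (pvStepB ts) (pvVcdHeader, List.replicate 7 none)
      = ((PySem.List.pyRange 0 (m : Int) 1).foldl (pvStepA ts) pvVcdHeader,
         if m = 0 then List.replicate 7 none else pvValsOpt ((m : Int) - 1)) := by
  induction m with
  | zero => simp [PySem.List.pyRange_one_eq_nil]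
  | succ k ih =>
    have hsplit : PySem.List.pyRange 0 ((k + 1 : Nat) : Int) 1
        = PySem.List.pyRange 0 (k : Int) 1 ++ [(k : Int)] := by
      have := PySem.List.pyRange_one_succ_right (a := 0) (b := (k : Int)) (by positivity)
      simpa [Nat.cast_succ] using this
    rw [hsplit, List.foldl_append, List.foldl_append, ih]
    simp only [List.foldl_cons, List.foldl_nil]
    rcases Nat.eq_zero_or_pos k with hk | hk
    · subst hk
      simpa using pvStepB_zero ts pvVcdHeader
    · have hkpos : (0 : Int) < (k : Int) := by exact_mod_cast hk
      rw [if_neg (by omega), pvStepB_pos ts _ _ hkpos]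
      simp [Nat.cast_succ]

-- ===== VERDICT (by name: the statement is the Claim_ definition above) =====
theorem create_realistic_vcd_content_py_spec : Claim_equal_create_realistic_vcd_content_py := by
  intro total_time num_points _ _
  unfold Spec_create_realistic_vcd_content_py
  unfold create_realistic_vcd_content_py create_realistic_vcd_content_py_alt
  rcases le_or_gt num_points 0 with h | h
  · simp [PySem.List.pyRange_one_eq_nil h]
  · have hm : num_points = ((num_points.toNat : Nat) : Int) := by omega
    rw [hm]
    simp only [pvFold_inv]
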